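-- pv_equiv track=rewrite | github.com/PaddlePaddle/PaddleRec | tools/utils/static_ps/flow_helper.py | get_online_pass_interval
-- ===== SOURCE A (Python) =====
-- def get_online_pass_interval(split_interval, split_per_pass,
--                              is_data_hourly_placed):
--     split_interval = int(split_interval)
--     split_per_pass = int(split_per_pass)
--     splits_per_day = 24 * 60 // split_interval
--     pass_per_day = splits_per_day // split_per_pass
--     left_train_hour = 0
--     right_train_hour = 23
--
--     start = 0
--     split_path = []
--     for i in range(splits_per_day):
--         h = start // 60
--         m = start % 60
--         if h < left_train_hour or h > right_train_hour:
--             start += split_interval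
--             continue
--         if is_data_hourly_placed:
--             split_path.append("%02d" % h)
--         else:
--             split_path.append("%02d%02d" % (h, m))
--         start += split_interval
--
--     start = 0
--     online_pass_interval = []
--     for i in range(pass_per_day):
--         online_pass_interval.append([])
--         for j in range(start, start + split_per_pass):
--             online_pass_interval[i].append(split_path[j])
--         start += split_per_pass
--
--     return online_pass_interval
-- ===== SOURCE B (Python) =====
-- def get_online_pass_interval(split_interval, split_per_pass,
--                              is_data_hourly_placed):
--     split_interval = int(split_interval)
--     split_per_pass = int(split_per_pass)
--     pass_per_day = (24 * 60 // split_interval) // split_per_pass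
--     fmt = "%02d" if is_data_hourly_placed else "%02d%02d"
--
--     def cell(idx):
--         start = idx * split_interval
--         h, m = start // 60, start % 60
--         return fmt % h if is_data_hourly_placed else fmt % (h, m)
--
--     return [[cell(p * split_per_pass + j) for j in range(split_per_pass)]
--             for p in range(pass_per_day)]
-- ===== Notes on version B (the rewrite author's own statement) =====
-- stated objective: simpler
-- what changed: B drops A's intermediate flat split_path list and the second reslicing loop over running start indices, computing each cell directly from its global index idx = p*split_per_pass + j in one nested comprehension (and drops the hour filter, which never fires).
import Mathlib
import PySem

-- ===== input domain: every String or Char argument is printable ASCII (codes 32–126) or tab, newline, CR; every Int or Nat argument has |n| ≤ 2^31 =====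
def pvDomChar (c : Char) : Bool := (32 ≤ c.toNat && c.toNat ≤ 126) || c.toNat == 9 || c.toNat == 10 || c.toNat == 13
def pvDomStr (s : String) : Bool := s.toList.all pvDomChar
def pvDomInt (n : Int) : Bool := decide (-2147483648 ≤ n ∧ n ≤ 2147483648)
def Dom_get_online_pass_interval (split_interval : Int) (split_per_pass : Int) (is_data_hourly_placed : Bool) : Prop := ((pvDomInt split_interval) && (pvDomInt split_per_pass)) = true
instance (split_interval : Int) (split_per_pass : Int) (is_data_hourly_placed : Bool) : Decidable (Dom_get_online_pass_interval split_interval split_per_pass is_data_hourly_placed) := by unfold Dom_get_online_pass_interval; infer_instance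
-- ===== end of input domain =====

-- B replaces A's build-flat-then-reslice two-pass construction by one direct nested
-- generation from the global cell index (objective: simpler).

-- Python's "%02d" % n: pads only one-character renderings, i.e. exactly 0 ≤ n < 10.
def pvPad2 (n : Int) : String :=
  if 0 ≤ n ∧ n < 10 then "0" ++ PySem.Int.toStr n else PySem.Int.toStr n

-- ===== PORT A =====
-- first loop of A: builds split_path with running start; left_train_hour = 0, right_train_hour = 23
def pvLoop1 (split_interval : Int) (is_data_hourly_placed : Bool) (splits_per_day : Int) :
    List String × Int :=
  (PySem.List.pyRange 0 splits_per_day 1).foldl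
    (fun (st : List String × Int) _ =>
      let start := st.2
      let h := PySem.Int.floordiv start 60
      let m := PySem.Int.mod start 60
      if h < 0 ∨ h > 23 then (st.1, start + split_interval)
      else (st.1 ++ [if is_data_hourly_placed then pvPad2 h else pvPad2 h ++ pvPad2 m],
            start + split_interval))
    ([], 0)

-- inner loop of A's second pass: row i (start = i*split_per_pass).
-- split_path[j]: index is in range whenever Python does not raise (Pre_ below); default never read there.
def pvRow (split_path : List String) (split_per_pass : Int) (start : Int) : List String :=
  (PySem.List.pyRange start (start + split_per_pass) 1).foldl
    (fun (r : List String) j => r ++ [PySem.List.pyGetD split_path j ""]) []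

-- second loop of A: online_pass_interval[i].append(...) ported as building row i then appending it
def pvLoop2 (split_path : List String) (split_per_pass : Int) (pass_per_day : Int) :
    List (List String) × Int :=
  (PySem.List.pyRange 0 pass_per_day 1).foldl
    (fun (st : List (List String) × Int) _ =>
      (st.1 ++ [pvRow split_path split_per_pass st.2], st.2 + split_per_pass))
    ([], 0)

def get_online_pass_interval (split_interval : Int) (split_per_pass : Int) (is_data_hourly_placed : Bool) : List (List String) :=
  let splits_per_day := PySem.Int.floordiv (24 * 60) split_interval
  let pass_per_day := PySem.Int.floordiv splits_per_day split_per_pass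
  (pvLoop2 (pvLoop1 split_interval is_data_hourly_placed splits_per_day).1
    split_per_pass pass_per_day).1

-- ===== PORT B =====
def get_online_pass_interval_alt (split_interval : Int) (split_per_pass : Int) (is_data_hourly_placed : Bool) : List (List String) :=
  let pass_per_day :=
    PySem.Int.floordiv (PySem.Int.floordiv (24 * 60) split_interval) split_per_pass
  (PySem.List.pyRange 0 pass_per_day 1).map (fun p =>
    (PySem.List.pyRange 0 split_per_pass 1).map (fun j =>
      let start := (p * split_per_pass + j) * split_interval
      let h := PySem.Int.floordiv start 60
      let m := PySem.Int.mod start 60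
      if is_data_hourly_placed then pvPad2 h else pvPad2 h ++ pvPad2 m))

-- ===== PRECONDITION & SPEC =====
-- Pre_ excludes exactly split_interval = 0 and split_per_pass = 0, where A raises ZeroDivisionError.
def Pre_get_online_pass_interval (split_interval : Int) (split_per_pass : Int) (is_data_hourly_placed : Bool) : Prop :=
  split_interval ≠ 0 ∧ split_per_pass ≠ 0
instance (split_interval : Int) (split_per_pass : Int) (is_data_hourly_placed : Bool) : Decidable (Pre_get_online_pass_interval split_interval split_per_pass is_data_hourly_placed) := by unfold Pre_get_online_pass_interval; infer_instance
def pvWitness_get_online_pass_interval : Int × Int × Bool := (30, 2, false)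
def Spec_get_online_pass_interval (split_interval : Int) (split_per_pass : Int) (is_data_hourly_placed : Bool) (out : List (List String)) : Prop := out = get_online_pass_interval_alt split_interval split_per_pass is_data_hourly_placed
instance (split_interval : Int) (split_per_pass : Int) (is_data_hourly_placed : Bool) (out : List (List String)) : Decidable (Spec_get_online_pass_interval split_interval split_per_pass is_data_hourly_placed out) := by unfold Spec_get_online_pass_interval; infer_instance

-- ===== CLAIM (what is proved, stated in full; the proofs are below) =====
def Claim_equal_get_online_pass_interval : Prop := ∀ (split_interval : Int) (split_per_pass : Int) (is_data_hourly_placed : Bool), Dom_get_online_pass_interval split_interval split_per_pass is_data_hourly_placed → Pre_get_online_pass_interval split_interval split_per_pass is_data_hourly_placed → Spec_get_online_pass_interval split_interval split_per_pass is_data_hourly_placed (get_online_pass_interval split_interval split_per_pass is_data_hourly_placed)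

-- ===== LEMMAS AND PROOFS =====

-- the cell at global split index i (proof-side characterisation shared by both reductions)
def pvCell (split_interval : Int) (is_data_hourly_placed : Bool) (i : Int) : String :=
  let start := i * split_interval
  let h := PySem.Int.floordiv start 60
  let m := PySem.Int.mod start 60
  if is_data_hourly_placed then pvPad2 h else pvPad2 h ++ pvPad2 m

-- generic shape of both of A's outer loops: a fold that appends g(start) and advances start by d
theorem pvFoldTrack {α : Type} (f : List α × Int → Int → List α × Int) (g : Int → α)
    (d : Int) (Q : Int → Prop)
    (hf : ∀ (st : List α × Int) (x : Int), Q st.2 → f st x = (st.1 ++ [g st.2], st.2 + d)) :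
    ∀ (n : Nat) (a : Int) (acc : List α) (s : Int), (∀ k : Nat, k < n → Q (s + k * d)) →
      (PySem.List.pyRange a (a + n) 1).foldl f (acc, s)
        = (acc ++ (List.range n).map (fun k : Nat => g (s + (k : Int) * d)), s + n * d) := by
  intro n
  induction n with
  | zero =>
    intro a acc s _
    rw [PySem.List.pyRange_one_eq_nil (by omega : a + ((0 : Nat) : Int) ≤ a)]
    simp
  | succ m ih =>
    intro a acc s hQ
    rw [PySem.List.pyRange_one_cons (by push_cast; omega : a < a + ((m + 1 : Nat) : Int))]
    simp only [List.foldl_cons]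
    rw [hf (acc, s) a (by simpa using hQ 0 (by omega))]
    rw [show a + ((m + 1 : Nat) : Int) = (a + 1) + ((m : Nat) : Int) by push_cast; ring]
    rw [ih (a + 1) (acc ++ [g s]) (s + d)
      (fun k hk => by
        have h := hQ (k + 1) (by omega)
        have : s + ((k + 1 : Nat) : Int) * d = s + d + (k : Int) * d := by push_cast; ring
        rwa [this] at h)]
    refine Prod.ext ?_ ?_
    · rw [List.range_succ_eq_map]
      simp only [List.map_cons, List.map_map, Nat.cast_zero, zero_mul, add_zero,
        List.append_assoc, List.singleton_append]
      congr 2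
      apply List.map_congr_left
      intro k _
      have h : s + d + (k : Int) * d = s + ((Nat.succ k : Nat) : Int) * d := by push_cast; ring
      simp [Function.comp, h]
    · push_cast; ring

-- A's first loop never skips: for 0 < si it produces the cell of every global index
theorem pvLoop1_eq (si : Int) (b : Bool) (hsi : 0 < si) :
    (pvLoop1 si b (PySem.Int.floordiv (24 * 60) si)).1
      = (List.range (PySem.Int.floordiv (24 * 60) si).toNat).map
          (fun k : Nat => pvCell si b (k : Int)) := by
  have h0 : (0 : Int) ≤ PySem.Int.floordiv (24 * 60) si :=
    (PySem.Int.le_floordiv_iff_mul_le hsi).mpr (by norm_num)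
  have hmul : PySem.Int.floordiv (24 * 60) si * si ≤ 24 * 60 :=
    (PySem.Int.le_floordiv_iff_mul_le hsi).mp le_rfl
  have key := pvFoldTrack
    (f := fun (st : List String × Int) (_ : Int) =>
      let start := st.2
      let h := PySem.Int.floordiv start 60
      let m := PySem.Int.mod start 60
      if h < 0 ∨ h > 23 then (st.1, start + si)
      else (st.1 ++ [if b then pvPad2 h else pvPad2 h ++ pvPad2 m], start + si))
    (g := fun s => if b then pvPad2 (PySem.Int.floordiv s 60)
      else pvPad2 (PySem.Int.floordiv s 60) ++ pvPad2 (PySem.Int.mod s 60))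
    (d := si) (Q := fun s => 0 ≤ s ∧ s < 24 * 60)
    (by
      intro st x hQ
      obtain ⟨h1, h2⟩ := hQ
      have hh0 : (0 : Int) ≤ PySem.Int.floordiv st.2 60 :=
        (PySem.Int.le_floordiv_iff_mul_le (by norm_num)).mpr (by linarith)
      have hh1 : PySem.Int.floordiv st.2 60 < 24 :=
        (PySem.Int.floordiv_lt_iff_lt_mul (by norm_num)).mpr (by linarith)
      show (if PySem.Int.floordiv st.2 60 < 0 ∨ PySem.Int.floordiv st.2 60 > 23
          then (st.1, st.2 + si)
          else (st.1 ++ [if b then pvPad2 (PySem.Int.floordiv st.2 60)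
            else pvPad2 (PySem.Int.floordiv st.2 60) ++ pvPad2 (PySem.Int.mod st.2 60)],
            st.2 + si)) = _
      rw [if_neg (by omega)])
    ((PySem.Int.floordiv (24 * 60) si).toNat) 0 [] 0
    (by
      intro k hk
      have hk' : (k : Int) ≤ PySem.Int.floordiv (24 * 60) si - 1 := by omega
      have hmk : (k : Int) * si ≤ (PySem.Int.floordiv (24 * 60) si - 1) * si :=
        mul_le_mul_of_nonneg_right hk' (le_of_lt hsi)
      have hexp := sub_one_mul (PySem.Int.floordiv (24 * 60) si) si
      constructor
      · positivity
      · simp only [zero_add]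
        nlinarith)
  unfold pvLoop1
  rw [show PySem.Int.floordiv (24 * 60) si
      = 0 + (((PySem.Int.floordiv (24 * 60) si).toNat : Nat) : Int) by omega]
  rw [key]
  simp only [List.nil_append, zero_add, Int.toNat_natCast]
  apply List.map_congr_left
  intro k _
  rfl

-- A's second loop appends one row per pass index
theorem pvLoop2_eq (sp : List String) (spp : Int) (n : Nat) :
    (pvLoop2 sp spp (n : Int)).1
      = (List.range n).map (fun k : Nat => pvRow sp spp ((k : Int) * spp)) := by
  have key := pvFoldTrack
    (f := fun (st : List (List String) × Int) (_ : Int) =>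
      (st.1 ++ [pvRow sp spp st.2], st.2 + spp))
    (g := fun s => pvRow sp spp s) (d := spp) (Q := fun _ => True)
    (fun _ _ _ => rfl) n 0 [] 0 (fun _ _ => trivial)
  unfold pvLoop2
  rw [show (n : Int) = 0 + (n : Int) from (zero_add _).symm, key]
  simp only [List.nil_append, zero_add]

theorem pvLoop2_nonpos (sp : List String) (spp n : Int) (hn : n ≤ 0) :
    (pvLoop2 sp spp n).1 = [] := by
  unfold pvLoop2
  rw [PySem.List.pyRange_one_eq_nil hn]
  rfl

-- a row is the slice of split_path starting at `start`
theorem pvRow_eq (sp : List String) (spp start : Int) :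
    pvRow sp spp start
      = (List.range spp.toNat).map (fun t : Nat => PySem.List.pyGetD sp (start + (t : Int)) "") := by
  unfold pvRow
  rw [PySem.List.foldl_append_singleton_eq_map, PySem.List.pyRange_one]
  simp [List.map_map, show start + spp - start = spp by ring]

-- indexing the materialised split_path
theorem pvIndex (si : Int) (b : Bool) (splits : Int) (j : Int)
    (hj0 : 0 ≤ j) (hj : j < splits) :
    PySem.List.pyGetD ((List.range splits.toNat).map (fun k : Nat => pvCell si b (k : Int))) j ""
      = pvCell si b j := by
  have h : (List.range splits.toNat).map (fun k : Nat => pvCell si b (k : Int))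
      = (PySem.List.pyRange 0 splits 1).map (pvCell si b) := by
    rw [PySem.List.pyRange_one]
    simp [List.map_map]
  rw [h, PySem.List.pyGetD_map_pyRange_of_nonneg _ _ _ _ hj0 hj]

theorem pvMapRangePos {α : Type} (F : Int → α) (m : Int) :
    (PySem.List.pyRange 0 m 1).map F = (List.range m.toNat).map (fun k : Nat => F (k : Int)) := by
  rw [PySem.List.pyRange_one]
  simp [List.map_map]

-- ===== VERDICT (by name: the statement is the Claim_ definition above) =====
theorem get_online_pass_interval_spec : Claim_equal_get_online_pass_interval := by
  intro si spp b _ hpre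
  obtain ⟨hsi0, hspp0⟩ := hpre
  unfold Spec_get_online_pass_interval
  show get_online_pass_interval si spp b = get_online_pass_interval_alt si spp b
  simp only [get_online_pass_interval, get_online_pass_interval_alt]
  by_cases hp : PySem.Int.floordiv (PySem.Int.floordiv (24 * 60) si) spp ≤ 0
  · rw [pvLoop2_nonpos _ _ _ hp, PySem.List.pyRange_one_eq_nil hp]
    rfl
  · push_neg at hp
    rcases lt_or_gt_of_ne hspp0 with hsppneg | hspppos
    · -- spp < 0: every row is empty on both sides
      rw [show PySem.Int.floordiv (PySem.Int.floordiv (24 * 60) si) spp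
          = (((PySem.Int.floordiv (PySem.Int.floordiv (24 * 60) si) spp).toNat : Nat) : Int)
          by omega]
      rw [pvLoop2_eq]
      simp only [pvMapRangePos, Int.toNat_natCast]
      apply List.map_congr_left
      intro k _
      unfold pvRow
      rw [PySem.List.pyRange_one_eq_nil (by linarith : (k : Int) * spp + spp ≤ (k : Int) * spp)]
      simp [Int.toNat_of_nonpos (le_of_lt hsppneg)]
    · rcases lt_or_gt_of_ne hsi0 with hsineg | hsipos
      · -- si < 0 forces pass_per_day < 0, contradicting hp
        exfalso
        have hsplits : PySem.Int.floordiv (24 * 60) si < 0 := by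
          rw [← PySem.Int.floordiv_neg_neg (24 * 60) si]
          exact (PySem.Int.floordiv_lt_iff_lt_mul (by omega : (0 : Int) < -si)).mpr (by norm_num)
        have : PySem.Int.floordiv (PySem.Int.floordiv (24 * 60) si) spp < 0 :=
          (PySem.Int.floordiv_lt_iff_lt_mul hspppos).mpr (by linarith)
        omega
      · -- main case: 0 < si, 0 < spp
        have hmul2 : PySem.Int.floordiv (PySem.Int.floordiv (24 * 60) si) spp * spp
            ≤ PySem.Int.floordiv (24 * 60) si :=
          (PySem.Int.le_floordiv_iff_mul_le hspppos).mp le_rfl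
        rw [pvLoop1_eq si b hsipos]
        rw [show PySem.Int.floordiv (PySem.Int.floordiv (24 * 60) si) spp
            = (((PySem.Int.floordiv (PySem.Int.floordiv (24 * 60) si) spp).toNat : Nat) : Int)
            by omega]
        rw [pvLoop2_eq]
        simp only [pvMapRangePos, Int.toNat_natCast]
        apply List.map_congr_left
        intro k hk
        have hkb : (k : Int) ≤ PySem.Int.floordiv (PySem.Int.floordiv (24 * 60) si) spp - 1 := by
          simp only [List.mem_range] at hk
          omega
        rw [pvRow_eq]
        apply List.map_congr_left
        intro t ht
        simp only [List.mem_range] at ht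
        have hidx0 : (0 : Int) ≤ (k : Int) * spp + (t : Int) := by positivity
        have hidx : (k : Int) * spp + (t : Int) < PySem.Int.floordiv (24 * 60) si := by
          have hmk : (k : Int) * spp
              ≤ (PySem.Int.floordiv (PySem.Int.floordiv (24 * 60) si) spp - 1) * spp :=
            mul_le_mul_of_nonneg_right hkb (le_of_lt hspppos)
          have hexp := sub_one_mul (PySem.Int.floordiv (PySem.Int.floordiv (24 * 60) si) spp) spp
          have ht2 : (t : Int) <= spp - 1 := by omega
          nlinarith
        rw [pvIndex si b _ _ hidx0 hidx]
        rfl
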